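-- pv_equiv track=rewrite | github.com/Zjtep/jz_runescape_bots | core/RS.py | getAncientMagicMenuPosition
-- ===== SOURCE A (Python) =====
-- def getAncientMagicMenuPosition(win_coord):
--     item_size = [25, 27]
--     spacing = 18
--
--     item = []
--
--     x1 = win_coord[0]
--     y1 = win_coord[1]
--     x2 = win_coord[0] + item_size[0]
--     y2 = win_coord[1] + item_size[1]
--
--     for m in range(7):
--         for n in range(4):
--             # print n
--
--             item.append([x1, y1, x2, y2])
--
--             x1 += item_size[0]
--             x2 += item_size[0]
--             x1 += spacing
--             x2 += spacing
--         x1 = win_coord[0]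
--         x2 = win_coord[0] + item_size[0]
--         y1 += item_size[1]
--         y2 += item_size[1]
--
--     return item
-- ===== SOURCE B (Python) =====
-- def getAncientMagicMenuPosition(win_coord):
--     x, y = win_coord[0], win_coord[1]
--     return [[x + 43 * n, y + 27 * m, x + 25 + 43 * n, y + 27 + 27 * m]
--             for m in range(7) for n in range(4)]
-- ===== Notes on version B (the rewrite author's own statement) =====
-- stated objective: simpler
-- what changed: Replaces the four running accumulators and per-iteration reset/increment bookkeeping with a single comprehension computing each rectangle directly from its (row, col) indices.
import Mathlib
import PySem

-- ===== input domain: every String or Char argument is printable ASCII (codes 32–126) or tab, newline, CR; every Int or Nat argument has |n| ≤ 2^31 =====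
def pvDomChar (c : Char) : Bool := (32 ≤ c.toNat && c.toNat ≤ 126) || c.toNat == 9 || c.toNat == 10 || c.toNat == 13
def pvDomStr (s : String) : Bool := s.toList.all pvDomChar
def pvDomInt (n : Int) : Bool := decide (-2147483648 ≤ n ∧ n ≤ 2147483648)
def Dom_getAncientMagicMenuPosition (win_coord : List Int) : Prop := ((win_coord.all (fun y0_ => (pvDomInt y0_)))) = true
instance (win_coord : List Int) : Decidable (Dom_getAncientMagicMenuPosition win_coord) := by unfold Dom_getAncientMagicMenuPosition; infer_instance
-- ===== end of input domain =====

-- B replaces A's four running accumulators with a closed-form rectangle per (row, col) index; objective: simpler.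

-- ===== PORT A =====
-- literal port: state (x1, y1, x2, y2, item) threaded through the nested loops
def getAncientMagicMenuPosition (win_coord : List Int) : List (List Int) :=
  let item_size : List Int := [25, 27]
  let spacing : Int := 18
  let is0 := (PySem.List.pyGet? item_size 0).getD 0
  let is1 := (PySem.List.pyGet? item_size 1).getD 0
  let x1 := (PySem.List.pyGet? win_coord 0).getD 0
  let y1 := (PySem.List.pyGet? win_coord 1).getD 0
  let x2 := x1 + is0
  let y2 := y1 + is1
  let st := (PySem.List.pyRange 0 7 1).foldl (fun (st : Int × Int × Int × Int × List (List Int)) _ =>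
    let st2 := (PySem.List.pyRange 0 4 1).foldl
      (fun (st : Int × Int × Int × Int × List (List Int)) _ =>
        let (x1, y1, x2, y2, item) := st
        let item := item ++ [[x1, y1, x2, y2]]
        let x1 := x1 + is0
        let x2 := x2 + is0
        let x1 := x1 + spacing
        let x2 := x2 + spacing
        (x1, y1, x2, y2, item)) st
    let (_, y1, _, y2, item) := st2
    ((PySem.List.pyGet? win_coord 0).getD 0, y1 + is1,
     (PySem.List.pyGet? win_coord 0).getD 0 + is0, y2 + is1, item))
    (x1, y1, x2, y2, ([] : List (List Int)))
  st.2.2.2.2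

-- ===== PORT B =====
def getAncientMagicMenuPosition_alt (win_coord : List Int) : List (List Int) :=
  let x := (PySem.List.pyGet? win_coord 0).getD 0
  let y := (PySem.List.pyGet? win_coord 1).getD 0
  (PySem.List.pyRange 0 7 1).flatMap (fun m =>
    (PySem.List.pyRange 0 4 1).map (fun n =>
      [x + 43 * n, y + 27 * m, x + 25 + 43 * n, y + 27 + 27 * m]))

-- ===== PRECONDITION & SPEC =====
-- A raises IndexError when win_coord has fewer than two elements; those inputs are excluded.
def Pre_getAncientMagicMenuPosition (win_coord : List Int) : Prop := 2 ≤ win_coord.length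
instance (win_coord : List Int) : Decidable (Pre_getAncientMagicMenuPosition win_coord) := by unfold Pre_getAncientMagicMenuPosition; infer_instance
def pvWitness_getAncientMagicMenuPosition : List Int := [100, 200]

def Spec_getAncientMagicMenuPosition (win_coord : List Int) (out : List (List Int)) : Prop := out = getAncientMagicMenuPosition_alt win_coord
instance (win_coord : List Int) (out : List (List Int)) : Decidable (Spec_getAncientMagicMenuPosition win_coord out) := by unfold Spec_getAncientMagicMenuPosition; infer_instance

-- ===== CLAIM =====
def Claim_equal_getAncientMagicMenuPosition : Prop := ∀ (win_coord : List Int), Dom_getAncientMagicMenuPosition win_coord → Pre_getAncientMagicMenuPosition win_coord → Spec_getAncientMagicMenuPosition win_coord (getAncientMagicMenuPosition win_coord)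

-- ===== LEMMAS AND PROOFS =====

-- ===== VERDICT =====
theorem getAncientMagicMenuPosition_spec : Claim_equal_getAncientMagicMenuPosition := by
  intro w _ _
  unfold Spec_getAncientMagicMenuPosition getAncientMagicMenuPosition getAncientMagicMenuPosition_alt
  simp [PySem.List.pyRange, List.range_succ]
  omega
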